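-- pv_equiv track=rewrite | github.com/Zeydel/Advent-Of-Code | AoC24/Day22/Day22.py | get_most_bananas
-- ===== SOURCE A (Python) =====
-- def get_banana_count_sum(first_appearances, target):
--
--     banana_sum = 0
--
--     for number in first_appearances:
--
--         if target in first_appearances[number]:
--
--             banana_sum += first_appearances[number][target]
--
--     return banana_sum
--
-- def get_most_bananas(number_sequences):
--
--     most_bananas = 0
--
--     for i in range(-9, 10):
--         for ii in range(-9, 10):
--             for iii in range(-9, 10):
--                 for iv in range(-9, 10):
--
--                     target = (i, ii, iii, iv)
--
--                     banana_sum = get_banana_count_sum(number_sequences, target)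
--
--                     if banana_sum > most_bananas:
--                         most_bananas = banana_sum
--
--     return most_bananas
-- ===== SOURCE B (Python) =====
-- def get_most_bananas(number_sequences):
--     totals = {}
--     for number, sequences in number_sequences.items():
--         for seq, val in sequences.items():
--             if len(seq) == 4 and all(-9 <= x <= 9 for x in seq):
--                 totals[seq] = totals.get(seq, 0) + val
--     best = 0
--     for v in totals.values():
--         if v > best:
--             best = v
--     return best
-- ===== Notes on version B (the rewrite author's own statement) =====
-- stated objective: faster
-- what changed: Instead of brute-forcing all 19^4 candidate difference sequences and summing over the buyers for each, B makes one pass over the data aggregating each buyer's sequence->value pairs into a single totals dict and returns the maximum aggregated value (floored at 0).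
import Mathlib
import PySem

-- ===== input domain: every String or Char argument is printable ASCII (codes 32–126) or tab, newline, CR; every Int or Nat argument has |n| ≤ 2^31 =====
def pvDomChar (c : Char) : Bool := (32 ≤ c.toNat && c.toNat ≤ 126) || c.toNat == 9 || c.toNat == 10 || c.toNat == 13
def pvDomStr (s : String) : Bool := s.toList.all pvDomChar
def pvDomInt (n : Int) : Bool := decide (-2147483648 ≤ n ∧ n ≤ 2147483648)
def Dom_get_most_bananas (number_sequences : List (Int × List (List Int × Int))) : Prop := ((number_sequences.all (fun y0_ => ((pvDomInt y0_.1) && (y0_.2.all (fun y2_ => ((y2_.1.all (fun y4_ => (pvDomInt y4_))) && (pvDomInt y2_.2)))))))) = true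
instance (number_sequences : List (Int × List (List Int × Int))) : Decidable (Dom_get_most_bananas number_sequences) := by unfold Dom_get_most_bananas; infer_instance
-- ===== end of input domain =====

-- B replaces A's brute force over all 19^4 candidate sequences by one aggregation
-- pass over the data (objective: faster, asymptotic).

-- ===== PORT A =====
-- 'first_appearances[number]' (number is a dict key, so no KeyError) is ported as getD with default [].
def get_banana_count_sum (first_appearances : List (Int × List (List Int × Int))) (target : List Int) : Int :=
  (PySem.Dict.mk first_appearances).keys.foldl
    (fun banana_sum number =>
      let inner := PySem.Dict.mk ((PySem.Dict.mk first_appearances).getD number [])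
      if inner.contains target then banana_sum + inner.getD target 0 else banana_sum)
    0

def get_most_bananas (number_sequences : List (Int × List (List Int × Int))) : Int :=
  (PySem.List.pyRange (-9) 10 1).foldl (fun most_bananas i =>
    (PySem.List.pyRange (-9) 10 1).foldl (fun most_bananas ii =>
      (PySem.List.pyRange (-9) 10 1).foldl (fun most_bananas iii =>
        (PySem.List.pyRange (-9) 10 1).foldl (fun most_bananas iv =>
          let target : List Int := [i, ii, iii, iv]
          let banana_sum := get_banana_count_sum number_sequences target
          if banana_sum > most_bananas then banana_sum else most_bananas)
          most_bananas)
        most_bananas)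
      most_bananas)
    0

-- ===== PORT B =====
-- 'len(seq) == 4 and all(-9 <= x <= 9 for x in seq)'
def pvValidSeq (t : List Int) : Bool := t.length == 4 && t.all (fun x => decide (-9 ≤ x) && decide (x ≤ 9))

def get_most_bananas_alt (number_sequences : List (Int × List (List Int × Int))) : Int :=
  let totals : PySem.Dict (List Int) Int :=
    number_sequences.foldl (fun totals p =>
      p.2.foldl (fun totals q =>
        if pvValidSeq q.1 then totals.insert q.1 (totals.getD q.1 0 + q.2) else totals)
        totals)
      PySem.Dict.empty
  totals.values.foldl (fun best v => if v > best then v else best) 0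

-- ===== PRECONDITION & SPEC =====
-- Pre_ excludes association lists with duplicate outer or inner keys: those cannot arise
-- from a Python dict (dict construction collapses duplicates), so on them neither port's
-- behaviour corresponds to the Python programs, and A's keys-then-first-match lookup and
-- B's items() pass would disagree on an input no Python caller can ever supply.
def Pre_get_most_bananas (number_sequences : List (Int × List (List Int × Int))) : Prop :=
  (number_sequences.map Prod.fst).Nodup ∧ ∀ p ∈ number_sequences, (p.2.map Prod.fst).Nodup
instance (number_sequences : List (Int × List (List Int × Int))) : Decidable (Pre_get_most_bananas number_sequences) := by unfold Pre_get_most_bananas; infer_instance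

def pvWitness_get_most_bananas : (List (Int × List (List Int × Int))) :=
  [(1, [([1, 2, 3, 4], 5), ([0, 0, 0, 0], 2)]), (2, [([1, 2, 3, 4], 3)])]

def Spec_get_most_bananas (number_sequences : List (Int × List (List Int × Int))) (out : Int) : Prop := out = get_most_bananas_alt number_sequences
instance (number_sequences : List (Int × List (List Int × Int))) (out : Int) : Decidable (Spec_get_most_bananas number_sequences out) := by unfold Spec_get_most_bananas; infer_instance

-- ===== CLAIM (what is proved, stated in full; the proofs are below) =====
def Claim_equal_get_most_bananas : Prop := ∀ (number_sequences : List (Int × List (List Int × Int))), Dom_get_most_bananas number_sequences → Pre_get_most_bananas number_sequences → Spec_get_most_bananas number_sequences (get_most_bananas number_sequences)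

-- ===== LEMMAS AND PROOFS =====

-- proof-side abbreviations
def pvContrib (dd : List (List Int × Int)) (t : List Int) : Int :=
  ((dd.filter (fun q => pvValidSeq q.1 && q.1 == t)).map Prod.snd).sum

def pvS (ns : List (Int × List (List Int × Int))) (t : List Int) : Int :=
  (ns.map (fun p => pvContrib p.2 t)).sum

def pvR : List Int := PySem.List.pyRange (-9) 10 1

def pvTall : List (List Int) :=
  pvR.flatMap (fun i => pvR.flatMap (fun ii => pvR.flatMap (fun iii => pvR.map (fun iv => [i, ii, iii, iv]))))

lemma mem_pvTall (t : List Int) : t ∈ pvTall ↔ pvValidSeq t = true := by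
  constructor
  · intro h
    simp only [pvTall, List.mem_flatMap, List.mem_map, pvR, PySem.List.mem_pyRange_one] at h
    obtain ⟨i, hi, ii, hii, iii, hiii, iv, hiv, rfl⟩ := h
    simp [pvValidSeq]; omega
  · intro h
    simp only [pvValidSeq, Bool.and_eq_true, beq_iff_eq, List.all_eq_true, decide_eq_true_eq] at h
    obtain ⟨hlen, hmem⟩ := h
    match t, hlen with
    | [a, b, c, d], _ =>
      simp only [pvTall, List.mem_flatMap, List.mem_map, pvR, PySem.List.mem_pyRange_one]
      refine ⟨a, ?_, b, ?_, c, ?_, d, ?_, rfl⟩ <;>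
        · have := hmem a (by simp); have := hmem b (by simp); have := hmem c (by simp)
          have := hmem d (by simp); omega

-- running max: 'if v > acc then v else acc' is max
lemma pvFoldIfMax {α : Type} (f : α → Int) (l : List α) (c : Int) :
    l.foldl (fun a x => if f x > a then f x else a) c = (l.map f).foldl max c := by
  rw [List.foldl_map]
  apply PySem.List.foldl_congr_mem
  intro acc x _
  simp only [max_def]
  split <;> split <;> omega

-- ===== A-side characterisation =====

lemma pvInnerContrib (dd : List (List Int × Int)) (hnd : (dd.map Prod.fst).Nodup)
    (t : List Int) (hv : pvValidSeq t = true) :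
    (if (PySem.Dict.mk dd).contains t then (PySem.Dict.mk dd).getD t 0 else 0) = pvContrib dd t := by
  induction dd with
  | nil => simp [pvContrib, PySem.Dict.contains]
  | cons q rest ih =>
    obtain ⟨qk, qv⟩ := q
    simp only [List.map_cons, List.nodup_cons] at hnd
    by_cases hk : qk = t
    · subst hk
      have hrest : (rest.filter (fun r => pvValidSeq r.1 && r.1 == qk)) = [] := by
        rw [List.filter_eq_nil_iff]
        intro r hr hc
        simp only [Bool.and_eq_true, beq_iff_eq] at hc
        exact hnd.1 (by rw [← hc.2]; exact List.mem_map_of_mem hr)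
      have hcont : (PySem.Dict.mk ((qk, qv) :: rest)).contains qk = true := by
        rw [PySem.Dict.contains_eq_isSome_get?, PySem.Dict.get?_mk_cons]
        simp
      have hget : (PySem.Dict.mk ((qk, qv) :: rest)).getD qk 0 = qv := by
        rw [PySem.Dict.getD_eq_get?_getD, PySem.Dict.get?_mk_cons]
        simp
      simp [pvContrib, hcont, hget, hv, hrest]
    · have hbeq : (qk == t) = false := by simp [hk]
      have hcont : (PySem.Dict.mk ((qk, qv) :: rest)).contains t = (PySem.Dict.mk rest).contains t := by
        rw [PySem.Dict.contains_eq_isSome_get?, PySem.Dict.contains_eq_isSome_get?,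
          PySem.Dict.get?_mk_cons, hbeq]
        simp
      have hget : (PySem.Dict.mk ((qk, qv) :: rest)).getD t 0 = (PySem.Dict.mk rest).getD t 0 := by
        rw [PySem.Dict.getD_eq_get?_getD, PySem.Dict.getD_eq_get?_getD, PySem.Dict.get?_mk_cons, hbeq]
        simp
      rw [hcont, hget, ih hnd.2]
      simp [pvContrib, hbeq]

lemma pvAFold (fa : List (Int × List (List Int × Int))) (hnd : (fa.map Prod.fst).Nodup)
    (t : List Int) : ∀ c : Int,
    (fa.map Prod.fst).foldl
      (fun bs number =>
        let inner := PySem.Dict.mk ((PySem.Dict.mk fa).getD number [])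
        if inner.contains t then bs + inner.getD t 0 else bs) c
    = c + (fa.map (fun p =>
        if (PySem.Dict.mk p.2).contains t then (PySem.Dict.mk p.2).getD t 0 else 0)).sum := by
  induction fa with
  | nil => intro c; simp
  | cons p rest ih =>
    obtain ⟨pk, pd⟩ := p
    intro c
    simp only [List.map_cons, List.nodup_cons] at hnd
    simp only [List.map_cons, List.foldl_cons]
    have hget0 : (PySem.Dict.mk ((pk, pd) :: rest)).getD pk [] = pd := by
      rw [PySem.Dict.getD_eq_get?_getD, PySem.Dict.get?_mk_cons]; simp
    have hgetn : ∀ n ∈ rest.map Prod.fst,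
        (PySem.Dict.mk ((pk, pd) :: rest)).getD n [] = (PySem.Dict.mk rest).getD n [] := by
      intro n hn
      have hne : (pk == n) = false := by
        simp only [beq_eq_false_iff_ne, ne_eq]
        exact fun h => hnd.1 (h ▸ hn)
      rw [PySem.Dict.getD_eq_get?_getD, PySem.Dict.getD_eq_get?_getD, PySem.Dict.get?_mk_cons, hne]
      simp
    rw [PySem.List.foldl_congr_mem (rest.map Prod.fst)
        (fun bs number =>
          if (PySem.Dict.mk ((PySem.Dict.mk ((pk, pd) :: rest)).getD number [])).contains t then
            bs + (PySem.Dict.mk ((PySem.Dict.mk ((pk, pd) :: rest)).getD number [])).getD t 0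
          else bs)
        (fun bs number =>
          let inner := PySem.Dict.mk ((PySem.Dict.mk rest).getD number [])
          if inner.contains t then bs + inner.getD t 0 else bs)
        _ (fun bs n hn => by simp only [hgetn n hn])]
    rw [ih hnd.2]
    rw [hget0]
    simp only [List.sum_cons]
    split <;> ring

lemma pvAeq (ns : List (Int × List (List Int × Int))) (h : Pre_get_most_bananas ns) :
    get_most_bananas ns = (pvTall.map (pvS ns)).foldl max 0 := by
  obtain ⟨hout, hin⟩ := h
  have hS : ∀ t ∈ pvTall, get_banana_count_sum ns t = pvS ns t := by
    intro t ht
    have hv := (mem_pvTall t).1 ht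
    unfold get_banana_count_sum
    have hkeys : (PySem.Dict.mk ns).keys = ns.map Prod.fst := by
      simp [PySem.Dict.keys]
    rw [hkeys, pvAFold ns hout t 0, zero_add]
    unfold pvS
    congr 1
    apply List.map_congr_left
    intro p hp
    exact pvInnerContrib p.2 (hin p hp) t hv
  -- flatten the four nested loops into one fold over pvTall
  unfold get_most_bananas
  have : (PySem.List.pyRange (-9) 10 1).foldl (fun most_bananas i =>
      (PySem.List.pyRange (-9) 10 1).foldl (fun most_bananas ii =>
        (PySem.List.pyRange (-9) 10 1).foldl (fun most_bananas iii =>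
          (PySem.List.pyRange (-9) 10 1).foldl (fun most_bananas iv =>
            let target : List Int := [i, ii, iii, iv]
            let banana_sum := get_banana_count_sum ns target
            if banana_sum > most_bananas then banana_sum else most_bananas)
            most_bananas) most_bananas) most_bananas) 0
      = pvTall.foldl (fun a t => if get_banana_count_sum ns t > a then get_banana_count_sum ns t else a) 0 := by
    simp only [pvTall, pvR, List.foldl_flatMap, List.foldl_map]
  rw [this]
  rw [pvFoldIfMax (fun t => get_banana_count_sum ns t) pvTall 0]
  congr 1
  apply List.map_congr_left
  intro t ht
  exact hS t ht

-- ===== B-side characterisation =====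

lemma pvBInnerGetD (dd : List (List Int × Int)) : ∀ (d : PySem.Dict (List Int) Int) (k : List Int),
    (dd.foldl (fun d q =>
        if pvValidSeq q.1 then d.insert q.1 (d.getD q.1 0 + q.2) else d) d).getD k 0
    = d.getD k 0 + pvContrib dd k := by
  induction dd with
  | nil => intro d k; simp [pvContrib]
  | cons q rest ih =>
    intro d k
    simp only [List.foldl_cons]
    by_cases hval : pvValidSeq q.1 = true
    · rw [if_pos hval, ih]
      by_cases hk : q.1 = k
      · subst hk
        rw [PySem.Dict.getD_insert, if_pos rfl]
        simp [pvContrib, hval]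
        ring
      · rw [PySem.Dict.getD_insert, if_neg (fun h => hk h.symm)]
        have : (q.1 == k) = false := by simp [hk]
        simp [pvContrib, this]
    · rw [if_neg hval, ih]
      have : pvValidSeq q.1 = false := by simpa using hval
      simp [pvContrib, this]

lemma pvBInnerKeys (dd : List (List Int × Int)) : ∀ (d : PySem.Dict (List Int) Int) (k : List Int),
    k ∈ (dd.foldl (fun d q =>
        if pvValidSeq q.1 then d.insert q.1 (d.getD q.1 0 + q.2) else d) d).keys
    ↔ k ∈ d.keys ∨ ∃ q ∈ dd, pvValidSeq q.1 = true ∧ q.1 = k := by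
  induction dd with
  | nil => intro d k; simp
  | cons q rest ih =>
    intro d k
    simp only [List.foldl_cons]
    by_cases hval : pvValidSeq q.1 = true
    · rw [if_pos hval, ih]
      simp only [PySem.Dict.mem_keys_insert, List.mem_cons]
      constructor
      · rintro ((h | h) | h)
        · exact Or.inr ⟨q, Or.inl rfl, hval, h.symm⟩
        · exact Or.inl h
        · obtain ⟨r, hr, h1, h2⟩ := h; exact Or.inr ⟨r, Or.inr hr, h1, h2⟩
      · rintro (h | ⟨r, hmem, h1, h2⟩)
        · exact Or.inl (Or.inr h)
        · rcases hmem with heq | hr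
          · exact Or.inl (Or.inl (by rw [← h2, heq]))
          · exact Or.inr ⟨r, hr, h1, h2⟩
    · rw [if_neg hval, ih]
      constructor
      · rintro (h | ⟨r, hr, h1, h2⟩)
        · exact Or.inl h
        · exact Or.inr ⟨r, List.mem_cons_of_mem _ hr, h1, h2⟩
      · rintro (h | ⟨r, hmem, h1, h2⟩)
        · exact Or.inl h
        · rcases List.mem_cons.1 hmem with heq | hr
          · exact absurd (heq ▸ h1) hval
          · exact Or.inr ⟨r, hr, h1, h2⟩

lemma pvBInnerNodup (dd : List (List Int × Int)) : ∀ (d : PySem.Dict (List Int) Int),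
    d.keys.Nodup →
    (dd.foldl (fun d q =>
        if pvValidSeq q.1 then d.insert q.1 (d.getD q.1 0 + q.2) else d) d).keys.Nodup := by
  induction dd with
  | nil => intro d h; simpa using h
  | cons q rest ih =>
    intro d h
    simp only [List.foldl_cons]
    by_cases hval : pvValidSeq q.1 = true
    · rw [if_pos hval]; exact ih _ (PySem.Dict.nodup_keys_insert _ _ _ h)
    · rw [if_neg hval]; exact ih _ h

def pvTotals (ns : List (Int × List (List Int × Int))) : PySem.Dict (List Int) Int :=
  ns.foldl (fun totals p =>
    p.2.foldl (fun totals q =>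
      if pvValidSeq q.1 then totals.insert q.1 (totals.getD q.1 0 + q.2) else totals)
      totals)
    PySem.Dict.empty

lemma pvTotalsGetD (ns : List (Int × List (List Int × Int))) (k : List Int) :
    (pvTotals ns).getD k 0 = pvS ns k := by
  unfold pvTotals
  suffices h : ∀ (d : PySem.Dict (List Int) Int),
      (ns.foldl (fun totals p =>
        p.2.foldl (fun totals q =>
          if pvValidSeq q.1 then totals.insert q.1 (totals.getD q.1 0 + q.2) else totals)
          totals) d).getD k 0 = d.getD k 0 + pvS ns k by
    rw [h]; simp [PySem.Dict.getD_empty]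
  induction ns with
  | nil => intro d; simp [pvS]
  | cons p rest ih =>
    intro d
    simp only [List.foldl_cons]
    rw [ih, pvBInnerGetD]
    simp [pvS]
    ring

lemma pvTotalsKeys (ns : List (Int × List (List Int × Int))) (k : List Int) :
    k ∈ (pvTotals ns).keys ↔ ∃ p ∈ ns, ∃ q ∈ p.2, pvValidSeq q.1 = true ∧ q.1 = k := by
  unfold pvTotals
  suffices h : ∀ (d : PySem.Dict (List Int) Int),
      k ∈ (ns.foldl (fun totals p =>
        p.2.foldl (fun totals q =>
          if pvValidSeq q.1 then totals.insert q.1 (totals.getD q.1 0 + q.2) else totals)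
          totals) d).keys ↔ k ∈ d.keys ∨ ∃ p ∈ ns, ∃ q ∈ p.2, pvValidSeq q.1 = true ∧ q.1 = k by
    rw [h]; simp [PySem.Dict.keys_empty]
  induction ns with
  | nil => intro d; simp
  | cons p rest ih =>
    intro d
    simp only [List.foldl_cons]
    rw [ih, pvBInnerKeys]
    simp only [List.mem_cons]
    constructor
    · rintro ((h | ⟨q, hq, h1, h2⟩) | ⟨r, hr, q, hq, h1, h2⟩)
      · exact Or.inl h
      · exact Or.inr ⟨p, Or.inl rfl, q, hq, h1, h2⟩
      · exact Or.inr ⟨r, Or.inr hr, q, hq, h1, h2⟩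
    · rintro (h | ⟨r, (rfl | hr), q, hq, h1, h2⟩)
      · exact Or.inl (Or.inl h)
      · exact Or.inl (Or.inr ⟨q, hq, h1, h2⟩)
      · exact Or.inr ⟨r, hr, q, hq, h1, h2⟩

lemma pvTotalsNodup (ns : List (Int × List (List Int × Int))) : (pvTotals ns).keys.Nodup := by
  unfold pvTotals
  suffices h : ∀ (d : PySem.Dict (List Int) Int), d.keys.Nodup →
      (ns.foldl (fun totals p =>
        p.2.foldl (fun totals q =>
          if pvValidSeq q.1 then totals.insert q.1 (totals.getD q.1 0 + q.2) else totals)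
          totals) d).keys.Nodup by
    exact h _ (by simp [PySem.Dict.keys_empty])
  induction ns with
  | nil => intro d h; simpa using h
  | cons p rest ih =>
    intro d h
    simp only [List.foldl_cons]
    exact ih _ (pvBInnerNodup p.2 d h)

lemma pvSNotKey (ns : List (Int × List (List Int × Int))) (t : List Int)
    (h : ¬ ∃ p ∈ ns, ∃ q ∈ p.2, pvValidSeq q.1 = true ∧ q.1 = t) : pvS ns t = 0 := by
  unfold pvS
  apply List.sum_eq_zero
  intro x hx
  obtain ⟨p, hp, rfl⟩ := List.mem_map.1 hx
  unfold pvContrib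
  have : p.2.filter (fun q => pvValidSeq q.1 && q.1 == t) = [] := by
    rw [List.filter_eq_nil_iff]
    intro q hq hc
    simp only [Bool.and_eq_true, beq_iff_eq] at hc
    exact h ⟨p, hp, q, hq, hc.1, hc.2⟩
  simp [this]

lemma pvBeq (ns : List (Int × List (List Int × Int))) :
    get_most_bananas_alt ns = ((pvTotals ns).values.foldl max 0) := by
  show (pvTotals ns).values.foldl (fun best v => if v > best then v else best) 0 = _
  have h := pvFoldIfMax (fun v : Int => v) (pvTotals ns).values 0
  simpa using h

-- ===== final antisymmetry =====

lemma pvMain (ns : List (Int × List (List Int × Int))) (h : Pre_get_most_bananas ns) :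
    get_most_bananas ns = get_most_bananas_alt ns := by
  rw [pvAeq ns h, pvBeq ns]
  set T := pvTotals ns with hT
  have hvalmem : ∀ v ∈ T.values, ∃ k ∈ T.keys, T.getD k 0 = v := by
    intro v hv
    obtain ⟨⟨k, v'⟩, hkv, rfl⟩ := List.mem_map.1 hv
    exact ⟨k, PySem.Dict.mem_keys_of_mem_items _ hkv,
      PySem.Dict.getD_of_mem_items _ hkv (pvTotalsNodup ns) 0⟩
  have hkeyval : ∀ k ∈ T.keys, T.getD k 0 ∈ T.values := by
    intro k hk
    have hc : T.contains k = true := (PySem.Dict.contains_iff_mem_keys _ _).2 hk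
    rw [PySem.Dict.contains_eq_isSome_get?] at hc
    obtain ⟨v, hv⟩ := Option.isSome_iff_exists.1 hc
    have := PySem.Dict.mem_items_of_get?_eq_some _ hv
    rw [PySem.Dict.getD_eq_get?_getD, hv]
    exact List.mem_map.2 ⟨(k, v), this, rfl⟩
  apply le_antisymm
  · rcases PySem.List.foldl_max_mem (pvTall.map (pvS ns)) 0 with heq | hmem
    · rw [heq]; exact (PySem.List.le_foldl_max T.values 0).1
    · obtain ⟨t, ht, heq⟩ := List.mem_map.1 hmem
      rw [← heq]
      by_cases hk : t ∈ T.keys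
      · have := hkeyval t hk
        rw [pvTotalsGetD] at this
        exact (PySem.List.le_foldl_max T.values 0).2 _ this
      · rw [pvSNotKey ns t (fun hex => hk ((pvTotalsKeys ns t).2 hex))]
        exact (PySem.List.le_foldl_max T.values 0).1
  · rcases PySem.List.foldl_max_mem T.values 0 with heq | hmem
    · rw [heq]; exact (PySem.List.le_foldl_max (pvTall.map (pvS ns)) 0).1
    · obtain ⟨k, hk, hval⟩ := hvalmem _ hmem
      have hvalid : pvValidSeq k = true := by
        obtain ⟨p, _, q, _, h1, h2⟩ := (pvTotalsKeys ns k).1 hk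
        exact h2 ▸ h1
      have hkT : k ∈ pvTall := (mem_pvTall k).2 hvalid
      rw [← hval, pvTotalsGetD]
      exact (PySem.List.le_foldl_max (pvTall.map (pvS ns)) 0).2 _
        (List.mem_map.2 ⟨k, hkT, rfl⟩)

-- ===== VERDICT (by name: the statement is the Claim_ definition above) =====
theorem get_most_bananas_spec : Claim_equal_get_most_bananas := by
  intro ns _ hpre
  unfold Spec_get_most_bananas
  exact pvMain ns hpre
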